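-- pv_equiv track=rewrite | github.com/taaaaryu/lab | Opti/analitical_eval/test.py | generate_service_combinations
-- ===== SOURCE A (Python) =====
-- from itertools import combinations, chain, product
--
-- def generate_service_combinations(services, num_software):
--     all_combinations = []
--     n = len(services)
--     for indices in combinations(range(n - 1), num_software - 1):
--         split_indices = list(chain([-1], indices, [n - 1]))
--         combination = [services[split_indices[i] + 1: split_indices[i + 1] + 1] for i in range(len(split_indices) - 1)]
--         all_combinations.append(combination)
--     return all_combinations
-- ===== SOURCE B (Python) =====
-- def generate_service_combinations(services, num_software):
--     # Mutation-free; enumerates contiguous k-partitions by recursion on the first group.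
--     if num_software < 1:
--         raise ValueError("num_software must be at least 1")
--
--     def partition(svcs, k):
--         if k == 1:
--             return [[svcs]]
--         result = []
--         for s in range(1, len(svcs) - k + 2):
--             head = svcs[:s]
--             for rest in partition(svcs[s:], k - 1):
--                 result.append([head] + rest)
--         return result
--
--     return partition(services, num_software)
-- ===== Notes on version B (the rewrite author's own statement) =====
-- stated objective: alternative
-- what changed: Replaces enumeration of split-index tuples via itertools.combinations plus slicing between split points with a direct recursion on the size of the first group, prepending it to each contiguous partition of the remaining suffix; same lexicographic output order.
import Mathlib
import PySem

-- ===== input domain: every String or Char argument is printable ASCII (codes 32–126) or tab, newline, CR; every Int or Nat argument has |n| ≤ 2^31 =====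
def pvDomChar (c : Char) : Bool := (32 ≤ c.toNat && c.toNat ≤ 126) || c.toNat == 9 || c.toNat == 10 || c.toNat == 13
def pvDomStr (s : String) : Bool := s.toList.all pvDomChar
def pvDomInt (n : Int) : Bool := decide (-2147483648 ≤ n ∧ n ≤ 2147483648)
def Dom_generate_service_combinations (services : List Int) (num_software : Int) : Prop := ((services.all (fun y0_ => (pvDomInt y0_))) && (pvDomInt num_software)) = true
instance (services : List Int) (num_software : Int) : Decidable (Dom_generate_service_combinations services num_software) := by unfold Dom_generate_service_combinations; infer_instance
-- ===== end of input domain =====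

-- B replaces enumeration of split-index combinations with a direct recursion on the first group (alternative decomposition, same output order).


-- ===== PORT A =====
-- itertools.combinations(xs, r) in lexicographic order (standard recursive definition)

def pvCombos : List Int → Nat → List (List Int)
  | _, 0 => [[]]
  | [], _ + 1 => []
  | x :: xs, r + 1 => ((pvCombos xs r).map (fun c => x :: c)) ++ pvCombos xs (r + 1)


def generate_service_combinations (services : List Int) (num_software : Int) : List (List (List Int)) :=
  -- Python raises ValueError (itertools.combinations with negative r) when num_software < 1; excluded by Pre_.
  if num_software < 1 then []
  else
    (pvCombos (PySem.List.pyRange 0 ((services.length : Int) - 1) 1) (num_software - 1).toNat).foldl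
      (fun all_combinations indices =>
        let split_indices : List Int := -1 :: (indices ++ [(services.length : Int) - 1])
        all_combinations ++
          [(PySem.List.pyRange 0 ((split_indices.length : Int) - 1) 1).map
            (fun i =>
              PySem.List.slice services
                (some (PySem.List.pyGetD split_indices i 0 + 1))
                (some (PySem.List.pyGetD split_indices (i + 1) 0 + 1)))])
      []

-- ===== PORT B =====
def pvPartition : List Int → Nat → List (List (List Int))
  | _, 0 => []
  | svcs, 1 => [[svcs]]
  | svcs, (k + 2) =>
    (PySem.List.pyRange 1 ((svcs.length : Int) - (k + 2) + 2) 1).foldl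
      (fun result s =>
        let head := PySem.List.slice svcs none (some s)
        (pvPartition (PySem.List.slice svcs (some s) none) (k + 1)).foldl
          (fun res rest => res ++ [head :: rest]) result)
      []


def generate_service_combinations_alt (services : List Int) (num_software : Int) : List (List (List Int)) :=
  -- B raises ValueError when num_software < 1; excluded by Pre_.
  if num_software < 1 then []
  else pvPartition services num_software.toNat

-- ===== PRECONDITION & SPEC =====
-- Pre_ excludes num_software < 1, where both A (via itertools.combinations) and B raise ValueError.
def Pre_generate_service_combinations (services : List Int) (num_software : Int) : Prop := 1 ≤ num_software
instance (services : List Int) (num_software : Int) : Decidable (Pre_generate_service_combinations services num_software) := by unfold Pre_generate_service_combinations; infer_instance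

def pvWitness_generate_service_combinations : List Int × Int := ([1, 2, 3], 2)

def Spec_generate_service_combinations (services : List Int) (num_software : Int) (out : List (List (List Int))) : Prop := out = generate_service_combinations_alt services num_software
instance (services : List Int) (num_software : Int) (out : List (List (List Int))) : Decidable (Spec_generate_service_combinations services num_software out) := by unfold Spec_generate_service_combinations; infer_instance

-- ===== CLAIM (what is proved, stated in full; the proofs are below) =====
def Claim_equal_generate_service_combinations : Prop := ∀ (services : List Int) (num_software : Int), Dom_generate_service_combinations services num_software → Pre_generate_service_combinations services num_software → Spec_generate_service_combinations services num_software (generate_service_combinations services num_software)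

-- ===== LEMMAS AND PROOFS =====

-- the pieces of one combination: slices of svcs between consecutive split boundaries, starting after prev
def pvPieces (svcs : List Int) : Int → List Int → List (List Int)
  | _, [] => []
  | prev, b :: bs => PySem.List.slice svcs (some (prev + 1)) (some (b + 1)) :: pvPieces svcs b bs

def pvPicks : List Int → List (Int × List Int)
  | [] => []
  | x :: xs => (x, xs) :: pvPicks xs

lemma pvCombos_succ (xs : List Int) (r : Nat) :
    pvCombos xs (r + 1) =
      (pvPicks xs).flatMap (fun p => (pvCombos p.2 r).map (fun c => p.1 :: c)) := by
  induction xs with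
  | nil => simp [pvCombos, pvPicks]
  | cons x xs ih => simp [pvCombos, pvPicks, ih]

lemma pvCombos_nil_of_lt (xs : List Int) (r : Nat) (h : xs.length < r) : pvCombos xs r = [] := by
  induction xs generalizing r with
  | nil =>
    cases r with
    | zero => omega
    | succ r => simp [pvCombos]
  | cons x xs ih =>
    cases r with
    | zero => omega
    | succ r =>
      simp only [List.length_cons] at h
      cases r with
      | zero => omega
      | succ r => simp [pvCombos, ih (r + 1) (by omega), ih (r + 2) (by omega)]

lemma pvPicks_pyRange : ∀ (m : Nat) (a b : Int), b - a = (m : Int) →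
    pvPicks (PySem.List.pyRange a b 1) =
      (PySem.List.pyRange a b 1).map (fun c => (c, PySem.List.pyRange (c + 1) b 1)) := by
  intro m
  induction m with
  | zero => intro a b h; rw [PySem.List.pyRange_one_eq_nil (by omega)]; simp [pvPicks]
  | succ m ih =>
    intro a b h
    rw [PySem.List.pyRange_one_cons (by omega)]
    simp [pvPicks, ih (a + 1) b (by omega)]

lemma pvPartition_nil_of_short (xs : List Int) (k : Nat) (h : xs.length < k + 2) :
    pvPartition xs (k + 2) = [] := by
  show (PySem.List.pyRange 1 ((xs.length : Int) - (k + 2) + 2) 1).foldl _ [] = []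
  rw [PySem.List.pyRange_one_eq_nil (by omega)]
  rfl

lemma pvPartition_unfold (xs : List Int) (k : Nat) :
    pvPartition xs (k + 2) =
      (PySem.List.pyRange 1 ((xs.length : Int) - (k + 2) + 2) 1).flatMap
        (fun s => (pvPartition (PySem.List.slice xs (some s) none) (k + 1)).map
          (fun rest => PySem.List.slice xs none (some s) :: rest)) := by
  show (PySem.List.pyRange 1 ((xs.length : Int) - (k + 2) + 2) 1).foldl _ [] = _
  simp only [PySem.List.foldl_append_singleton_eq_map]
  rw [PySem.List.foldl_append_eq_flatMap]
  rfl

lemma pvMain (svcs : List Int) : ∀ (r a : Nat), a ≤ svcs.length →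
    (pvCombos (PySem.List.pyRange (a : Int) ((svcs.length : Int) - 1) 1) r).map
      (fun idx => pvPieces svcs ((a : Int) - 1) (idx ++ [(svcs.length : Int) - 1]))
    = pvPartition (svcs.drop a) (r + 1) := by
  intro r
  induction r with
  | zero =>
    intro a ha
    simp only [pvCombos, pvPartition, List.map_cons, List.map_nil, List.nil_append, pvPieces]
    rw [show ((a : Int) - 1 + 1) = (a : Int) by ring,
        show ((svcs.length : Int) - 1 + 1) = (svcs.length : Int) by ring,
        PySem.List.slice_natCast]
    rw [List.take_of_length_le (by simp)]
  | succ r ih =>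
    intro a ha
    by_cases hc : (a : Int) ≤ (svcs.length : Int) - 1
    · have hn1 : 1 ≤ svcs.length := by omega
      set n := svcs.length with hn
      set m := n - 1 - a with hmdef
      set m2 := n - a - r - 1 with hm2def
      have hm : (n : Int) - 1 - (a : Int) = (m : Int) := by omega
      rw [pvCombos_succ, pvPicks_pyRange m a ((n : Int) - 1) hm, List.flatMap_map,
          List.map_flatMap, pvPartition_unfold (svcs.drop a) r]
      have hlen : ((svcs.drop a).length : Int) = (n : Int) - (a : Int) := by
        rw [List.length_drop]; omega
      rw [hlen]
      rw [PySem.List.pyRange_one (a : Int) ((n : Int) - 1),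
          PySem.List.pyRange_one 1 ((n : Int) - (a : Int) - (r + 2) + 2)]
      have hma : ((n : Int) - 1 - (a : Int)).toNat = m := by omega
      have hmb : ((n : Int) - (a : Int) - (r + 2) + 2 - 1).toNat = m2 := by omega
      rw [hma, hmb, List.flatMap_map, List.flatMap_map]
      -- split the A-side index range: the tail produces no combinations
      have hsplit : m = m2 + (m - m2) := by omega
      rw [hsplit, List.range_add, List.flatMap_append]
      have htail : (List.flatMap
          (fun j => List.map (fun idx => pvPieces svcs ((a : Int) - 1) (idx ++ [(n : Int) - 1]))
            (List.map (fun c => ((a : Int) + (m2 + j : Nat) : Int) :: c)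
              (pvCombos (PySem.List.pyRange (((a : Int) + (m2 + j : Nat)) + 1) ((n : Int) - 1)) r)))
          (List.range (m - m2))) = [] := by
        rw [List.flatMap_eq_nil_iff]
        intro x hx
        rw [List.mem_range] at hx
        have hr1 : 1 ≤ r := by omega
        rw [pvCombos_nil_of_lt]
        · simp
        · rw [PySem.List.length_pyRange_one]; omega
      rw [List.flatMap_map, htail, List.append_nil]
      apply List.flatMap_congr
      intro j hj
      rw [List.mem_range] at hj
      simp only []
      have e3 : ((a : Int) + (j : Int) + 1) = ((a + j + 1 : Nat) : Int) := by push_cast; ring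
      rw [e3]
      have e1 : (1 + (j : Int)) = ((1 + j : Nat) : Int) := by push_cast; ring
      rw [e1, PySem.List.slice_to_natCast, PySem.List.slice_from_natCast, List.drop_drop]
      have e2 : a + (1 + j) = a + j + 1 := by omega
      rw [e2, ← ih (a + j + 1) (by omega), List.map_map, List.map_map]
      apply List.map_congr_left
      intro c hc2
      simp only [Function.comp, List.cons_append, pvPieces]
      congr 1
      · have e4 : ((a : Int) - 1 + 1) = ((a : Nat) : Int) := by ring
        rw [e4]
        have e5 : ((a : Int) + (j : Int) + 1) = ((a + j + 1 : Nat) : Int) := by push_cast; ring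
        rw [e5, PySem.List.slice_natCast]
        congr 1
        omega
      · congr 1
        push_cast
        ring

    · -- degenerate: candidate range empty on the A side, partition too short on the B side
      rw [PySem.List.pyRange_one_eq_nil (by omega)]
      show ([] : List (List (List Int))) = _
      rw [pvPartition_nil_of_short _ r (by rw [List.length_drop]; omega)]

lemma pvComp_pieces_aux (svcs : List Int) : ∀ (rest : List Int) (p : Int),
    (List.range rest.length).map
      (fun k => PySem.List.slice svcs (some (List.getD (p :: rest) k 0 + 1))
        (some (List.getD (p :: rest) (k + 1) 0 + 1))) = pvPieces svcs p rest := by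
  intro rest
  induction rest with
  | nil => intro p; simp [pvPieces]
  | cons b bs ih =>
    intro p
    rw [List.length_cons, List.range_succ_eq_map]
    simp only [List.map_cons, List.map_map, pvPieces]
    congr 1
    rw [← ih b]
    rfl

lemma pvComp_pieces (svcs : List Int) (p : Int) (rest : List Int) :
    (PySem.List.pyRange 0 (((p :: rest).length : Int) - 1) 1).map
      (fun i => PySem.List.slice svcs (some (PySem.List.pyGetD (p :: rest) i 0 + 1))
        (some (PySem.List.pyGetD (p :: rest) (i + 1) 0 + 1))) = pvPieces svcs p rest := by
  have h1 : (((p :: rest).length : Int) - 1) = (rest.length : Int) := by simp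
  rw [h1, PySem.List.pyRange_zero_nat, List.map_map, ← pvComp_pieces_aux svcs rest p]
  apply List.map_congr_left
  intro k hk
  simp only [Function.comp]
  have : ((k : Int) + 1) = ((k + 1 : Nat) : Int) := by push_cast; ring
  rw [this, PySem.List.pyGetD_natCast, PySem.List.pyGetD_natCast]

-- ===== VERDICT (by name: the statement is the Claim_ definition above) =====
theorem generate_service_combinations_spec : Claim_equal_generate_service_combinations := by
  intro services num_software _ hpre
  unfold Spec_generate_service_combinations generate_service_combinations generate_service_combinations_alt
  have h1 : ¬ (num_software < 1) := not_lt.mpr hpre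
  rw [if_neg h1, if_neg h1]
  simp only [PySem.List.foldl_append_singleton_eq_map, List.nil_append]
  have key := pvMain services (num_software - 1).toNat 0 (Nat.zero_le _)
  simp only [Nat.cast_zero, zero_sub, List.drop_zero] at key
  rw [List.map_congr_left (fun idx _ => pvComp_pieces services (-1) (idx ++ [(services.length : Int) - 1])), key]
  congr 1
  omega
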